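-- pv_equiv track=rewrite | github.com/zjsxply/coding-agent-kit | src/agent_runtime/parsing.py | last_nonempty_text
-- ===== SOURCE A (Python) =====
-- from typing import Any, Callable, Dict, Iterable, List, Optional
--
-- def last_nonempty_text(values: Optional[list[Any]]) -> Optional[str]:
--     if values is None:
--         return None
--     for value in reversed(values):
--         if not isinstance(value, str):
--             continue
--         cleaned = value.strip()
--         if cleaned:
--             return cleaned
--     return None
-- ===== SOURCE B (Python) =====
-- def last_nonempty_text(values):
--     if values is None:
--         return None
--     cleaned = [c for v in values if isinstance(v, str) and (c := v.strip())]
--     return cleaned[-1] if cleaned else None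
-- ===== Notes on version B (the rewrite author's own statement) =====
-- stated objective: alternative
-- what changed: Replaces the reverse early-exit scan with a forward comprehension that materializes all non-empty stripped strings and returns the last one.
import Mathlib
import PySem

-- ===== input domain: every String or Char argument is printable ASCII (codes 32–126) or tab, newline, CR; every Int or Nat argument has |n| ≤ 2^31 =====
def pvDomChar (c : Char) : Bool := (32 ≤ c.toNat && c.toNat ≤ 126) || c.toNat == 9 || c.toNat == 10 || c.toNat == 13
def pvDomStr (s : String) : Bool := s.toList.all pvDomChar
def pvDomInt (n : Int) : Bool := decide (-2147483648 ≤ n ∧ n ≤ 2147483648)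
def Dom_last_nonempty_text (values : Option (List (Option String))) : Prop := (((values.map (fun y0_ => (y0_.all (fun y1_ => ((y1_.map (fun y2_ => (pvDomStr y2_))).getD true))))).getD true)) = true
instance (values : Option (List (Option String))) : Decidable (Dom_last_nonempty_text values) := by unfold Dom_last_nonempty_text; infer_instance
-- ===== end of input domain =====

-- B replaces A's reverse early-exit scan by a forward build-then-select pass; same return value.

-- ===== PORT A =====
-- the 'for value in reversed(values)' loop: first non-empty stripped string, scanning the reversed list
def pvLoopA : List (Option String) → Option String
  | [] => none
  | v :: rest =>
    match v with
    | none => pvLoopA rest          -- not isinstance(value, str): continue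
    | some s =>
      let cleaned := PySem.Str.strip s
      if cleaned ≠ "" then some cleaned else pvLoopA rest

def last_nonempty_text (values : Option (List (Option String))) : Option String :=
  match values with
  | none => none
  | some vs => pvLoopA vs.reverse

-- ===== PORT B =====
def pvClean (v : Option String) : Option String :=
  v.bind (fun s => let c := PySem.Str.strip s; if c ≠ "" then some c else none)

def last_nonempty_text_alt (values : Option (List (Option String))) : Option String :=
  match values with
  | none => none
  | some vs => (vs.filterMap pvClean).getLast?   -- cleaned[-1] if cleaned else None

-- ===== PRECONDITION & SPEC =====
def Spec_last_nonempty_text (values : Option (List (Option String))) (out : Option String) : Prop := out = last_nonempty_text_alt values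
instance (values : Option (List (Option String))) (out : Option String) : Decidable (Spec_last_nonempty_text values out) := by unfold Spec_last_nonempty_text; infer_instance

-- ===== CLAIM (what is proved, stated in full; the proofs are below) =====
def Claim_equal_last_nonempty_text : Prop := ∀ (values : Option (List (Option String))), Dom_last_nonempty_text values → Spec_last_nonempty_text values (last_nonempty_text values)

-- ===== LEMMAS AND PROOFS =====
-- A's loop returns the first success of pvClean along its input
theorem pvLoopA_eq_head (l : List (Option String)) : pvLoopA l = (l.filterMap pvClean).head? := by
  induction l with
  | nil => rfl
  | cons v rest ih =>
    cases v with
    | none => simpa [pvLoopA, pvClean] using ih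
    | some s =>
      by_cases h : PySem.Str.strip s = ""
      · simpa [pvLoopA, pvClean, h] using ih
      · simp [pvLoopA, pvClean, h]

-- ===== VERDICT (by name: the statement is the Claim_ definition above) =====
theorem last_nonempty_text_spec : Claim_equal_last_nonempty_text := by
  intro values _
  unfold Spec_last_nonempty_text
  cases values with
  | none => rfl
  | some vs =>
    simp [last_nonempty_text, last_nonempty_text_alt, pvLoopA_eq_head,
      List.filterMap_reverse, List.head?_reverse]
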